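-- pv_equiv track=rewrite | github.com/igidae2026-creator/MapleWorld | simulation_py/world_graph.py | _region_for_level
-- ===== SOURCE A (Python) =====
-- def _region_for_level(level: int, regions: list[dict[str, object]]) -> str:
--     for region in regions:
--         if int(region["min_level"]) <= level <= int(region["max_level"]):
--             return str(region["region_id"])
--     if not regions:
--         return "unknown_region"
--     # deterministic nearest fallback
--     nearest = min(regions, key=lambda row: abs(level - int(row["min_level"])))
--     return str(nearest["region_id"])
-- ===== SOURCE B (Python) =====
-- def _region_for_level(level: int, regions: list[dict[str, object]]) -> str:
--     best_d = None
--     best_id = None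
--     for region in regions:
--         mn = int(region["min_level"])
--         if mn <= level <= int(region["max_level"]):
--             return str(region["region_id"])
--         d = abs(level - mn)
--         if best_d is None or d < best_d:
--             best_d = d
--             best_id = str(region["region_id"])
--     if best_d is None:
--         return "unknown_region"
--     return best_id
-- ===== Notes on version B (the rewrite author's own statement) =====
-- stated objective: simpler
-- what changed: Fuses A's separate match-scan and min()-fallback into one traversal that returns on the first in-range region and otherwise maintains a running (best_distance, best_id) with strict-< updates so the first minimal region wins, as min() does.
import Mathlib
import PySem

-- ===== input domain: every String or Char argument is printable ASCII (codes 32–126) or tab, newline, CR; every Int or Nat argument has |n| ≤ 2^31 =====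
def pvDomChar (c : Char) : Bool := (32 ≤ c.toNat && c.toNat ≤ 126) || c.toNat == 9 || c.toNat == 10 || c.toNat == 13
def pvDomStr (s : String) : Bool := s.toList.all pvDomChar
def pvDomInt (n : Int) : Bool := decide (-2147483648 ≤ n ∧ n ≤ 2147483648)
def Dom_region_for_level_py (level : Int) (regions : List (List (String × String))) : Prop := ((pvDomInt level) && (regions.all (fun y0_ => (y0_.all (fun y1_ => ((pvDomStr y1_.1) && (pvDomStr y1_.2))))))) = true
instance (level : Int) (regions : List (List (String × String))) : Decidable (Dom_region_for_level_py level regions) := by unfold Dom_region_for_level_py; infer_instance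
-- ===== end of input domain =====

-- B fuses A's match-scan and min()-fallback into one traversal with a running (best_distance, best_id); return values only.


-- shared helpers: dict lookup (first match), int(...) of a field, and the chained range test
-- (outside Pre_ they default to ""/0; inside Pre_ the lookups/parses always succeed)
def pvField (r : List (String × String)) (k : String) : String :=
  ((r.find? (fun p => p.1 == k)).map (fun p => p.2)).getD ""

def pvFieldInt (r : List (String × String)) (k : String) : Int :=
  (PySem.Int.ofStr? (pvField r k)).getD 0

def pvInRange (level : Int) (r : List (String × String)) : Bool :=
  decide (pvFieldInt r "min_level" ≤ level) && decide (level ≤ pvFieldInt r "max_level")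

-- ===== PORT A =====
-- the for-loop that returns on the first matching region (none = fell through)
def regionScanA (level : Int) : List (List (String × String)) → Option String
  | [] => none
  | r :: rest =>
    if pvInRange level r then some (pvField r "region_id")
    else regionScanA level rest

def region_for_level_py (level : Int) (regions : List (List (String × String))) : String :=
  match regionScanA level regions with
  | some s => s
  | none =>
    if regions = [] then "unknown_region"
    else
      match PySem.List.min? regions (fun row => |level - pvFieldInt row "min_level"|) with
      | some nearest => pvField nearest "region_id"
      | none => "unknown_region"   -- unreachable: regions ≠ []

-- ===== PORT B =====
-- single pass: return on first match, else keep the running (best_distance, best_id)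
def regionLoopB (level : Int) (best : Option (Int × String)) : List (List (String × String)) → String
  | [] => match best with
          | some b => b.2
          | none => "unknown_region"
  | r :: rest =>
    if pvInRange level r then pvField r "region_id"
    else
      let d : Int := |level - pvFieldInt r "min_level"|
      let best' : Option (Int × String) :=
        match best with
        | none => some (d, pvField r "region_id")
        | some (bd, bid) => if d < bd then some (d, pvField r "region_id") else some (bd, bid)
      regionLoopB level best' rest

def region_for_level_py_alt (level : Int) (regions : List (List (String × String))) : String :=
  regionLoopB level none regions

-- ===== PRECONDITION & SPEC =====
-- Pre_ requires every region to carry an int-parseable "min_level"/"max_level" and a "region_id" key: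
-- on regions it reaches without those, A raises KeyError/ValueError; this also excludes lists whose only
-- malformed region sits after an early match, where A (and B) still return that match.
def Pre_region_for_level_py (level : Int) (regions : List (List (String × String))) : Prop :=
  ∀ r ∈ regions,
    (PySem.Int.ofStr? (((r.find? (fun p => p.1 == "min_level")).map (fun p => p.2)).getD "")).isSome = true ∧
    (PySem.Int.ofStr? (((r.find? (fun p => p.1 == "max_level")).map (fun p => p.2)).getD "")).isSome = true ∧
    (r.find? (fun p => p.1 == "region_id")).isSome = true
instance (level : Int) (regions : List (List (String × String))) : Decidable (Pre_region_for_level_py level regions) := by unfold Pre_region_for_level_py; infer_instance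

def pvWitness_region_for_level_py : Int × (List (List (String × String))) :=
  (5, [[("min_level", "1"), ("max_level", "3"), ("region_id", "r1")],
       [("min_level", "4"), ("max_level", "9"), ("region_id", "r2")]])

def Spec_region_for_level_py (level : Int) (regions : List (List (String × String))) (out : String) : Prop := out = region_for_level_py_alt level regions
instance (level : Int) (regions : List (List (String × String))) (out : String) : Decidable (Spec_region_for_level_py level regions out) := by unfold Spec_region_for_level_py; infer_instance

-- ===== CLAIM (what is proved, stated in full; the proofs are below) =====
def Claim_equal_region_for_level_py : Prop := ∀ (level : Int) (regions : List (List (String × String))), Dom_region_for_level_py level regions → Pre_region_for_level_py level regions → Spec_region_for_level_py level regions (region_for_level_py level regions)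

-- ===== LEMMAS AND PROOFS =====

-- abbreviations used only in the proofs
def pvKey (level : Int) (r : List (String × String)) : Int := |level - pvFieldInt r "min_level"|
def pvPick (level : Int) (m r : List (String × String)) : List (String × String) :=
  if pvKey level r < pvKey level m then r else m

lemma min?_eq_foldl_pick (level : Int) (t : List (List (String × String))) :
    ∀ a, PySem.List.min? (a :: t) (fun row => |level - pvFieldInt row "min_level"|)
      = some (t.foldl (pvPick level) a) := by
  induction t with
  | nil => intro a; simp [PySem.List.min?, List.foldl]
  | cons x t ih =>
    intro a
    have h := ih (pvPick level a x)
    simp only [PySem.List.min?, List.foldl] at h ⊢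
    have e : (if (|level - pvFieldInt x "min_level"| : Int) < |level - pvFieldInt a "min_level"| then
          some x else some a) = some (pvPick level a x) := by
      unfold pvPick pvKey; split_ifs <;> rfl
    rw [e]
    exact h

lemma loopB_no_match (level : Int) (t : List (List (String × String)))
    (hnm : ∀ x ∈ t, pvInRange level x = false) :
    ∀ a, regionLoopB level (some (pvKey level a, pvField a "region_id")) t
      = pvField (t.foldl (pvPick level) a) "region_id" := by
  induction t with
  | nil => intro a; simp [regionLoopB, List.foldl]
  | cons x t ih =>
    intro a
    have hx : pvInRange level x = false := hnm x (by simp)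
    have ih' := ih (fun y hy => hnm y (by simp [hy])) (pvPick level a x)
    simp only [regionLoopB, hx, Bool.false_eq_true, if_false, List.foldl]
    have hsplit : (if (|level - pvFieldInt x "min_level"| : Int) < pvKey level a then
          some (|level - pvFieldInt x "min_level"|, pvField x "region_id")
        else some (pvKey level a, pvField a "region_id"))
        = some (pvKey level (pvPick level a x), pvField (pvPick level a x) "region_id") := by
      unfold pvPick pvKey; split_ifs <;> rfl
    rw [hsplit]
    exact ih'

lemma loopB_scan_some (level : Int) :
    ∀ (l : List (List (String × String))) (best : Option (Int × String)) (s : String),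
      regionScanA level l = some s → regionLoopB level best l = s := by
  intro l
  induction l with
  | nil => intro best s h; simp [regionScanA] at h
  | cons r t ih =>
    intro best s h
    by_cases hr : pvInRange level r = true
    · simp [regionScanA, hr] at h
      simp [regionLoopB, hr, h]
    · simp [regionScanA, hr] at h
      simp only [regionLoopB, hr, Bool.false_eq_true, if_false]
      exact ih _ s h

lemma scan_none_no_match (level : Int) :
    ∀ (l : List (List (String × String))), regionScanA level l = none →
      ∀ x ∈ l, pvInRange level x = false := by
  intro l
  induction l with
  | nil => intro _ x hx; simp at hx
  | cons r t ih =>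
    intro h x hx
    by_cases hr : pvInRange level r = true
    · simp [regionScanA, hr] at h
    · rcases List.mem_cons.mp hx with rfl | hxt
      · simpa using hr
      · exact ih (by simpa [regionScanA, hr] using h) x hxt

-- ===== VERDICT (by name: the statement is the Claim_ definition above) =====
theorem region_for_level_py_spec : Claim_equal_region_for_level_py := by
  intro level regions _ _
  unfold Spec_region_for_level_py region_for_level_py region_for_level_py_alt
  cases hscan : regionScanA level regions with
  | some s => exact (loopB_scan_some level regions none s hscan).symm
  | none =>
    cases regions with
    | nil => simp [regionLoopB]
    | cons r t =>
      have hnm := scan_none_no_match level (r :: t) hscan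
      have hr : pvInRange level r = false := hnm r (by simp)
      have hB : regionLoopB level none (r :: t)
          = pvField (t.foldl (pvPick level) r) "region_id" := by
        simp only [regionLoopB, hr, Bool.false_eq_true, if_false]
        exact loopB_no_match level t (fun y hy => hnm y (by simp [hy])) r
      rw [min?_eq_foldl_pick level t r]
      simp [hB]
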